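-- pv_equiv track=rewrite | github.com/pomah1874/Regression-Tree-Credibility-Model-of-Data-Breaches | code/data_breach_cart_model.py | cal_Nmin
-- ===== SOURCE A (Python) =====
-- def cal_Nmin(sc_dat):
--     mi_l = []
--     mi = 1
--     for u in range(len(sc_dat[2]) - 1):
--         if sc_dat[2][u + 1][0] == sc_dat[2][u][0]:
--             mi += 1
--         else:
--             mi_l.append(mi)
--             mi = 1
--     mi_l.append(mi)
--
--     return min(mi_l)
-- ===== SOURCE B (Python) =====
-- def cal_Nmin(sc_dat):
--     seq = sc_dat[2]
--     if len(seq) < 2: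
--         return 1
--     keys = [row[0] for row in seq]
--     cuts = [0] + [i for i, (a, b) in enumerate(zip(keys, keys[1:]), 1) if a != b] + [len(keys)]
--     return min(b - a for a, b in zip(cuts, cuts[1:]))
-- ===== Notes on version B (the rewrite author's own statement) =====
-- stated objective: alternative
-- what changed: Replaces the running-counter loop that resets at every key change by computing the boundary indices where the first key changes and taking the minimum gap between consecutive cut points.
import Mathlib
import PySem

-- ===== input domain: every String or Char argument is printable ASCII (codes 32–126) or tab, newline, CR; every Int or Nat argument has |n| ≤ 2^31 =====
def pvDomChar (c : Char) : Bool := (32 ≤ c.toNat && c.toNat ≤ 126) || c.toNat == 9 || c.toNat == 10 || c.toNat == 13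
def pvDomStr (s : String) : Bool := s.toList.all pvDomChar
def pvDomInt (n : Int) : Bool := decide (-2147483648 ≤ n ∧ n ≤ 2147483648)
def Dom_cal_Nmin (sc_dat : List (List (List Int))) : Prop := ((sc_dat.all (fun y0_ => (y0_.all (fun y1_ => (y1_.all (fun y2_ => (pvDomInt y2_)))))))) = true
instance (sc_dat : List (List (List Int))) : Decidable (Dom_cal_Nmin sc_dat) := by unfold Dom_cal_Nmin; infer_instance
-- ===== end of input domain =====

-- B replaces A's running-counter loop by boundary indices of key changes and minimum gaps
-- between consecutive cut points (objective: alternative; same cost). Equal on Pre_ (A raises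
-- outside Pre_: IndexError on len(sc_dat) < 3 or an empty row of sc_dat[2] that the loop reads).

-- shared helper: row[0] read with pyGetD (exact on Pre_, where every read row is nonempty)
def pvKey (row : List Int) : Int := PySem.List.pyGetD row 0 0

-- ===== PORT A =====
def cal_Nmin (sc_dat : List (List (List Int))) : Int :=
  let seq := PySem.List.pyGetD sc_dat 2 []
  let st := (PySem.List.pyRange 0 ((seq.length : Int) - 1) 1).foldl
    (fun (q : List Int × Int) u =>
      if pvKey (PySem.List.pyGetD seq (u + 1) []) = pvKey (PySem.List.pyGetD seq u []) then
        (q.1, q.2 + 1)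
      else
        (q.1 ++ [q.2], 1))
    ([], 1)
  (PySem.List.min? (st.1 ++ [st.2]) (fun x => x)).getD 0

-- ===== PORT B =====
def cal_Nmin_alt (sc_dat : List (List (List Int))) : Int :=
  let seq := PySem.List.pyGetD sc_dat 2 []
  if seq.length < 2 then 1
  else
    let keys := seq.map pvKey
    let cuts : List Int :=
      0 :: (((PySem.List.enumerate (keys.zip (PySem.List.slice keys (some 1) none)) 1).filter
              (fun e => !(e.2.1 == e.2.2))).map (·.1) ++ [(keys.length : Int)])
    (PySem.List.min?
      (List.zipWith (fun a b => b - a) cuts (PySem.List.slice cuts (some 1) none))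
      (fun x => x)).getD 0

-- ===== PRECONDITION & SPEC =====
-- Pre_: exactly where Python A returns normally: sc_dat[2] must exist (length ≥ 3), and when
-- sc_dat[2] has ≥ 2 rows the loop reads row[0] of every row, so every row must be nonempty.
def Pre_cal_Nmin (sc_dat : List (List (List Int))) : Prop :=
  3 ≤ sc_dat.length ∧
    (2 ≤ (sc_dat.getD 2 []).length → ∀ row ∈ sc_dat.getD 2 [], row ≠ [])
instance (sc_dat : List (List (List Int))) : Decidable (Pre_cal_Nmin sc_dat) := by
  unfold Pre_cal_Nmin; infer_instance

def pvWitness_cal_Nmin : List (List (List Int)) := [[], [], [[1], [1], [2]]]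

def Spec_cal_Nmin (sc_dat : List (List (List Int))) (out : Int) : Prop := out = cal_Nmin_alt sc_dat
instance (sc_dat : List (List (List Int))) (out : Int) : Decidable (Spec_cal_Nmin sc_dat out) := by
  unfold Spec_cal_Nmin; infer_instance

-- ===== CLAIM (what is proved, stated in full; the proofs are below) =====
def Claim_equal_cal_Nmin : Prop := ∀ (sc_dat : List (List (List Int))), Dom_cal_Nmin sc_dat → Pre_cal_Nmin sc_dat → Spec_cal_Nmin sc_dat (cal_Nmin sc_dat)

-- ===== LEMMAS AND PROOFS =====

-- run lengths of consecutive equal-component pairs (reference form shared by both proofs)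
def pvRuns : List (Int × Int) → Int → List Int
  | [], mi => [mi]
  | p :: t, mi => if p.2 = p.1 then pvRuns t (mi + 1) else mi :: pvRuns t 1

-- A's index loop over range(len-1) reading xs[k], xs[k+1] is a fold over adjacent pairs
theorem pv_idx_fold {α σ : Type} (d : α) (f : σ → α → α → σ) :
    ∀ (xs : List α) (x : α) (init : σ),
      (List.range xs.length).foldl
        (fun acc k => f acc ((x :: xs).getD k d) ((x :: xs).getD (k + 1) d)) init
        = ((x :: xs).zip xs).foldl (fun acc p => f acc p.1 p.2) init := by
  intro xs
  induction xs with
  | nil => intro x init; simp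
  | cons y t ih =>
      intro x init
      rw [List.length_cons, List.range_succ_eq_map, List.foldl_cons, List.foldl_map]
      simpa using ih y (f init x y)

-- A's accumulator pair, flushed at the end, is exactly the run-length list
theorem pv_fold_runs :
    ∀ (ps : List (Int × Int)) (acc : List Int) (mi : Int),
      (ps.foldl
          (fun (q : List Int × Int) p =>
            if p.2 = p.1 then (q.1, q.2 + 1) else (q.1 ++ [q.2], 1))
          (acc, mi)).1
        ++ [(ps.foldl
              (fun (q : List Int × Int) p =>
                if p.2 = p.1 then (q.1, q.2 + 1) else (q.1 ++ [q.2], 1))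
              (acc, mi)).2]
        = acc ++ pvRuns ps mi := by
  intro ps
  induction ps with
  | nil => intro acc mi; simp [pvRuns]
  | cons p t ih =>
      intro acc mi
      by_cases h : p.2 = p.1
      · simp [pvRuns, h, ih]
      · simp [pvRuns, h, ih]

-- B's gaps between consecutive cut points are exactly the run-length list
theorem pv_cuts_runs :
    ∀ (ps : List (Int × Int)) (s prev : Int),
      List.zipWith (fun a b => b - a)
          (prev :: (((PySem.List.enumerate ps s).filter (fun e => !(e.2.1 == e.2.2))).map (·.1)
              ++ [s + (ps.length : Int)]))
          ((((PySem.List.enumerate ps s).filter (fun e => !(e.2.1 == e.2.2))).map (·.1)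
              ++ [s + (ps.length : Int)]))
        = pvRuns ps (s - prev) := by
  intro ps
  induction ps with
  | nil => intro s prev; simp [PySem.List.enumerate_nil, pvRuns]
  | cons p t ih =>
      intro s prev
      rw [PySem.List.enumerate_cons]
      by_cases h : p.2 = p.1
      · have hb : (!(p.1 == p.2)) = false := by simp [h.symm]
        have hlen : s + ((p :: t).length : Int) = (s + 1) + (t.length : Int) := by
          simp; ring
        simp only [List.filter_cons, hb, Bool.false_eq_true, if_false, hlen]
        rw [ih (s + 1) prev]
        have : s + 1 - prev = s - prev + 1 := by ring
        rw [this]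
        simp [pvRuns, h]
      · have hb : (!(p.1 == p.2)) = true := by
          simp; exact fun he => h he.symm
        have hlen : s + ((p :: t).length : Int) = (s + 1) + (t.length : Int) := by
          simp; ring
        simp only [List.filter_cons, hb, if_true, List.map_cons, hlen, List.cons_append,
          List.zipWith_cons_cons]

        rw [ih (s + 1) s]
        simp [pvRuns, h]

-- both ports, as a function of seq = sc_dat[2], reduce to min over the same run-length list
theorem pv_main (sc_dat : List (List (List Int))) : cal_Nmin sc_dat = cal_Nmin_alt sc_dat := by
  unfold cal_Nmin cal_Nmin_alt
  generalize PySem.List.pyGetD sc_dat 2 [] = seq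
  cases seq with
  | nil => decide
  | cons r rs =>
      by_cases hrs : rs = []
      case pos =>
        subst hrs
        rfl
      case neg =>
      have hlen2 : ¬ (r :: rs).length < 2 := by
        have := List.length_pos_of_ne_nil hrs; simp; omega
      simp only [if_neg hlen2]
      -- A side: pyRange over Int indices → List.range over Nat indices
      have hA :
          (PySem.List.pyRange 0 (((r :: rs).length : Int) - 1) 1).foldl
              (fun (q : List Int × Int) u =>
                if pvKey (PySem.List.pyGetD (r :: rs) (u + 1) []) =
                    pvKey (PySem.List.pyGetD (r :: rs) u []) then
                  (q.1, q.2 + 1)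
                else (q.1 ++ [q.2], 1)) ([], 1)
            = (List.range rs.length).foldl
              (fun (q : List Int × Int) k =>
                if pvKey ((r :: rs).getD (k + 1) []) = pvKey ((r :: rs).getD k []) then
                  (q.1, q.2 + 1)
                else (q.1 ++ [q.2], 1)) ([], 1) := by
        have h1 : ((r :: rs).length : Int) - 1 = ((rs.length : Nat) : Int) := by
          simp
        rw [h1, PySem.List.pyRange_one, List.foldl_map]
        have h2 : (((rs.length : Nat) : Int) - 0).toNat = rs.length := by omega
        rw [h2]
        apply PySem.List.foldl_congr_mem
        intro q k _
        have e1 : (0 : Int) + (k : Int) + 1 = ((k + 1 : Nat) : Int) := by omega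
        have e2 : (0 : Int) + (k : Int) = ((k : Nat) : Int) := by omega
        rw [e1, e2, PySem.List.pyGetD_natCast, PySem.List.pyGetD_natCast]
      rw [hA, pv_idx_fold ([] : List Int)
        (fun (q : List Int × Int) a b =>
          if pvKey b = pvKey a then (q.1, q.2 + 1) else (q.1 ++ [q.2], 1))]
      -- fold over row pairs = fold over key pairs
      have hzip : ((r :: rs).map pvKey).zip
            (PySem.List.slice ((r :: rs).map pvKey) (some 1) none)
          = ((r :: rs).zip rs).map (Prod.map pvKey pvKey) := by
        rw [PySem.List.slice_from_one]
        have : ((r :: rs).map pvKey).tail = rs.map pvKey := by simp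
        rw [this, List.zip_map]
      rw [hzip]
      have hB : PySem.List.slice
          ((0 : Int) :: ((((PySem.List.enumerate (((r :: rs).zip rs).map (Prod.map pvKey pvKey)) 1).filter
              (fun e => !(e.2.1 == e.2.2))).map (·.1))
            ++ [(((r :: rs).map pvKey).length : Int)])) (some 1) none
          = ((((PySem.List.enumerate (((r :: rs).zip rs).map (Prod.map pvKey pvKey)) 1).filter
              (fun e => !(e.2.1 == e.2.2))).map (·.1))
            ++ [(((r :: rs).map pvKey).length : Int)]) := by
        rw [PySem.List.slice_from_one]; rfl
      rw [hB]
      have hlen : ((((r :: rs)).map pvKey).length : Int)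
          = 1 + (((((r :: rs)).zip rs).map (Prod.map pvKey pvKey)).length : Int) := by
        simp; omega
      rw [hlen, pv_cuts_runs]
      -- A side finish: accumulator flush
      have hfold := pv_fold_runs (((r :: rs).zip rs).map (Prod.map pvKey pvKey)) [] 1
      have hAB :
          ((r :: rs).zip rs).foldl
              (fun (q : List Int × Int) p =>
                if pvKey p.2 = pvKey p.1 then (q.1, q.2 + 1) else (q.1 ++ [q.2], 1)) ([], 1)
            = (((r :: rs).zip rs).map (Prod.map pvKey pvKey)).foldl
              (fun (q : List Int × Int) p =>
                if p.2 = p.1 then (q.1, q.2 + 1) else (q.1 ++ [q.2], 1)) ([], 1) := by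
        rw [List.foldl_map]; rfl
      rw [hAB, hfold]
      norm_num

-- ===== VERDICT (by name: the statement is the Claim_ definition above) =====
theorem cal_Nmin_spec : Claim_equal_cal_Nmin := by
  intro sc_dat _ _
  unfold Spec_cal_Nmin
  exact pv_main sc_dat
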